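-- pv_equiv track=rewrite | github.com/ThenTech/BDA-Assignments | Plagiarism/Resources/submissions/submissions/2588170.py | create_sequence
-- ===== SOURCE A (Python) =====
-- def create_sequence(string, index, length):
--     string2 = ""
--     for i in range(index, index + length):
--         while i < 0 or i >= len(string):
--             if i < 0:
--                 i += len(string)
--             if i >= len(string):
--                 i -= len(string)
--         string2 += string[i]
--     return (string2)
-- ===== SOURCE B (Python) =====
-- def create_sequence(string, index, length):
--     if length <= 0 or not string:
--         return ""
--     n = len(string)
--     start = index % n
--     repeats = (start + length - 1) // n + 1
--     return (string * repeats)[start:start + length]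
-- ===== Notes on version B (the rewrite author's own statement) =====
-- stated objective: faster
-- what changed: Replaces A's per-character while-loop (which walks a far-out index back into range one string-length at a time) with a single modulo, one string repetition covering the window, and one slice.
-- outside the precondition, e.g. on create_sequence('', 0, 3): A does not finish within the time limit, B returns ''
import Mathlib
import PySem

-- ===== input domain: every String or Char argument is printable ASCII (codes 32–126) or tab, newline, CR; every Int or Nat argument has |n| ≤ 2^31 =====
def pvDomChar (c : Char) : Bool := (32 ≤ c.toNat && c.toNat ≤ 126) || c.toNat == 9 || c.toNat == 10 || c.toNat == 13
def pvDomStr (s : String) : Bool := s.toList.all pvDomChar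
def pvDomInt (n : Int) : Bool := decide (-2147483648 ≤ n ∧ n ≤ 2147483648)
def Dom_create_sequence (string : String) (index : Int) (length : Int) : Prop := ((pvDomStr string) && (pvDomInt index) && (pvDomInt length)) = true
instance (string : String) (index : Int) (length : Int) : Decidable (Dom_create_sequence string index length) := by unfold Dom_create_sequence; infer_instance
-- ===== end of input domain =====

-- B replaces A's per-character while-loop wrapping with one modulo, one string
-- repetition and a single slice (objective: faster — A walks |index| down to range
-- one string-length at a time for every output character).

-- ===== PORT A =====
-- A's inner `while i < 0 or i >= len(string)` loop: one call = one pass of the loop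
-- body (only one of the two ifs can fire per pass when n > 0). The n ≤ 0 guard only
-- makes the function total: Python loops forever there (excluded by Pre_).
def pvWrapA (n i : Int) : Int :=
  if n ≤ 0 then i
  else if i < 0 then pvWrapA n (i + n)
  else if n ≤ i then pvWrapA n (i - n)
  else i
termination_by (if i < 0 then (n - i).toNat else i.toNat)
decreasing_by all_goals simp_wf <;> split <;> omega

def create_sequence (string : String) (index : Int) (length : Int) : String :=
  let s := string.toList
  let n : Int := PySem.List.len s
  -- string2 = ""; for i in range(index, index + length): … ; string2 += string[i]
  String.ofList ((PySem.List.pyRange index (index + length) 1).foldl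
    (fun acc i => acc ++ [PySem.List.pyGetD s (pvWrapA n i) ' ']) [])

-- ===== PORT B =====
def create_sequence_alt (string : String) (index : Int) (length : Int) : String :=
  if length ≤ 0 ∨ string.toList = [] then ""
  else
    let s := string.toList
    let n : Int := PySem.List.len s
    let start := PySem.Int.mod index n
    let repeats := PySem.Int.floordiv (start + length - 1) n + 1
    String.ofList (PySem.List.slice (PySem.List.pyRepeat s repeats)
      (some start) (some (start + length)))

-- ===== PRECONDITION & SPEC =====
-- Pre_ excludes only the empty string with positive length, where A's while loop
-- never terminates (Python hangs); A returns normally on every other input.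
def Pre_create_sequence (string : String) (index : Int) (length : Int) : Prop :=
  string ≠ "" ∨ length ≤ 0
instance (string : String) (index : Int) (length : Int) : Decidable (Pre_create_sequence string index length) := by unfold Pre_create_sequence; infer_instance

def pvWitness_create_sequence : String × Int × Int := ("ab", -3, 5)

def Spec_create_sequence (string : String) (index : Int) (length : Int) (out : String) : Prop := out = create_sequence_alt string index length
instance (string : String) (index : Int) (length : Int) (out : String) : Decidable (Spec_create_sequence string index length out) := by unfold Spec_create_sequence; infer_instance

-- ===== CLAIM (what is proved, stated in full; the proofs are below) =====
def Claim_equal_create_sequence : Prop := ∀ (string : String) (index : Int) (length : Int), Dom_create_sequence string index length → Pre_create_sequence string index length → Spec_create_sequence string index length (create_sequence string index length)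

-- ===== LEMMAS AND PROOFS =====

-- A's wrapping loop computes the Euclidean remainder.
theorem pvWrapA_eq_emod (n i : Int) (hn : 0 < n) : pvWrapA n i = i % n := by
  induction i using pvWrapA.induct n with
  | case1 i h => exact absurd hn (by omega)
  | case2 i h1 h2 ih =>
      rw [pvWrapA, if_neg (by omega : ¬ n ≤ 0), if_pos h2, ih, Int.add_emod_right]
  | case3 i h1 h2 h3 ih =>
      rw [pvWrapA, if_neg (by omega : ¬ n ≤ 0), if_neg h2, if_pos h3, ih, Int.sub_emod_right]
  | case4 i h1 h2 h3 =>
      rw [pvWrapA, if_neg (by omega : ¬ n ≤ 0), if_neg h2, if_neg h3]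
      exact (Int.emod_eq_of_lt (by omega) (by omega)).symm

-- element j of l repeated r times is l[j % len l]
theorem pvGetElem?_flatten_replicate {α : Type} (l : List α) (r j : Nat)
    (h : j < r * l.length) :
    (List.flatten (List.replicate r l))[j]? = l[j % l.length]? := by
  induction r generalizing j with
  | zero => omega
  | succ r ih =>
      have hl : 0 < l.length := by by_contra hc; simp at hc; simp [hc] at h
      have hmul : (r+1) * l.length = l.length + r * l.length := by ring
      rw [hmul] at h
      rw [List.replicate_succ, List.flatten_cons]
      by_cases hj : j < l.length
      · rw [List.getElem?_append_left hj, Nat.mod_eq_of_lt hj]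
      · have hle : l.length ≤ j := by omega
        rw [List.getElem?_append_right hle, Nat.mod_eq_sub_mod hle]
        exact ih (j - l.length) (by omega)

-- ===== VERDICT (by name: the statement is the Claim_ definition above) =====
theorem create_sequence_spec : Claim_equal_create_sequence := by
  intro string index length _hDom hPre
  unfold Spec_create_sequence create_sequence create_sequence_alt
  by_cases hL : length ≤ 0
  · -- empty output on both sides
    rw [PySem.List.pyRange_one_eq_nil (by omega)]
    simp [hL]
  · -- length > 0 and string ≠ "" (Pre_), so n > 0
    have hs : string.toList ≠ [] := by
      rcases hPre with h | h
      · intro hc; apply h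
        have := congrArg String.ofList hc
        simpa using this
      · omega
    rw [if_neg (not_or.mpr ⟨by omega, hs⟩)]
    set s := string.toList with hsdef
    have hn0 : 0 < (s.length : Int) := by
      have : s ≠ [] := hs
      have : 0 < s.length := List.length_pos_of_ne_nil this
      exact_mod_cast this
    simp only [PySem.List.len_eq]
    set n : Int := (s.length : Int) with hndef
    set start := PySem.Int.mod index n with hstart
    have hstart_emod : start = index % n := PySem.Int.mod_eq_emod_of_pos hn0
    have hstart_nonneg : 0 ≤ start := by rw [hstart_emod]; exact Int.emod_nonneg _ (by omega)
    have hstart_lt : start < n := by rw [hstart_emod]; exact Int.emod_lt_of_pos _ hn0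
    set repeats := PySem.Int.floordiv (start + length - 1) n + 1 with hrep
    have hq : PySem.Int.floordiv (start + length - 1) n = (start + length - 1) / n :=
      PySem.Int.floordiv_eq_ediv_of_pos hn0
    -- enough copies: start + length ≤ repeats * n
    have hcover : start + length ≤ repeats * n := by
      rw [hrep, hq]
      have h1 := Int.ediv_add_emod (start + length - 1) n
      have h2 := Int.emod_nonneg (start + length - 1) (by omega : n ≠ 0)
      have h3 := Int.emod_lt_of_pos (start + length - 1) hn0
      nlinarith [h1, h2, h3]
    have hrep_pos : 0 < repeats := by
      by_contra hc
      have hc' : repeats ≤ 0 := by omega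
      nlinarith [hcover, hstart_nonneg, hn0]
    -- A side: turn the foldl into a map over range
    rw [PySem.List.foldl_append_singleton_eq_map, List.nil_append,
        PySem.List.pyRange_one]
    -- B side: slice = drop/take of the flattened replication
    rw [PySem.List.slice_toNat _ hstart_nonneg (by omega)]
    congr 1
    unfold PySem.List.pyRepeat
    set L : Nat := length.toNat with hLdef
    have hLpos : 0 < L := by omega
    have hlen_flat : (List.flatten (List.replicate repeats.toNat s)).length
        = repeats.toNat * s.length := by
      simp [List.length_flatten, List.map_replicate, List.sum_replicate, Nat.mul_comm]
    have hblen : ((index + length - index).toNat) = L := by omega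
    have htake : (start + length).toNat - start.toNat = L := by omega
    rw [htake, hblen]
    apply List.ext_getElem?
    intro k
    by_cases hk : k < L
    · -- both sides defined, equal characters
      have hsn : (start.toNat : Int) = start := by omega
      have hrn : (repeats.toNat : Int) = repeats := by omega
      have hcast : ((repeats.toNat * s.length : Nat) : Int) = repeats * n := by
        push_cast [hrn]; rw [← hndef]
      have hkb : start.toNat + k < repeats.toNat * s.length := by omega
      rw [List.getElem?_map, List.getElem?_map, List.getElem?_range hk]
      rw [List.getElem?_take_of_lt hk, List.getElem?_drop,
          pvGetElem?_flatten_replicate _ _ _ hkb]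
      have hwrap : pvWrapA n (index + (k : Int)) = (index + k) % n :=
        pvWrapA_eq_emod n _ hn0
      have hmod_nonneg : 0 ≤ (index + (k : Int)) % n := Int.emod_nonneg _ (by omega)
      have hmod_lt : (index + (k : Int)) % n < n := Int.emod_lt_of_pos _ hn0
      have hm : (start.toNat + k) % s.length = ((index + (k : Int)) % n).toNat := by
        have h1 : (((start.toNat + k) % s.length : Nat) : Int) = (index + (k : Int)) % n := by
          push_cast
          rw [hsn, hstart_emod, ← hndef]
          conv_rhs => rw [Int.add_emod]
          rw [Int.add_emod (index % n) (k : Int)]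
          rw [Int.emod_emod_of_dvd _ dvd_rfl]
        omega
      simp only [Option.map_some]
      rw [hm, hwrap]
      rw [PySem.List.pyGetD_eq_getElem s ' ' hmod_nonneg (by rw [← hndef]; exact hmod_lt)]
      rw [List.getElem?_eq_getElem (by omega)]
    · -- both sides past the end
      rw [List.getElem?_eq_none (by simp; omega), List.getElem?_eq_none (by simp; omega)]
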